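-- pv_equiv track=rewrite | github.com/seanchatmangpt/dslmodel | redteam_reports/src/dslmodel/evolution/operators.py | _combine_impact_levels
-- ===== SOURCE A (Python) =====
-- def _combine_impact_levels(impact1: str, impact2: str) -> str:
--     """Combine impact levels from two parents"""
--     impact_order = {"low": 1, "medium": 2, "high": 3}
--
--     level1 = impact_order.get(impact1, 2)
--     level2 = impact_order.get(impact2, 2)
--
--     # Take the higher impact level
--     combined_level = max(level1, level2)
--
--     for level_name, level_value in impact_order.items():
--         if level_value == combined_level:
--             return level_name
--
--     return "medium"
-- ===== SOURCE B (Python) =====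
-- def _combine_impact_levels(impact1: str, impact2: str) -> str:
--     """Combine impact levels from two parents"""
--     if "high" in (impact1, impact2):
--         return "high"
--     if impact1 == "low" and impact2 == "low":
--         return "low"
--     return "medium"
-- ===== Notes on version B (the rewrite author's own statement) =====
-- stated objective: simpler
-- what changed: Replaces the rank-encode/max/reverse-lookup scheme with a direct rule-based decision: 'high' if either parent is high, 'low' only if both are low, otherwise 'medium' (unknown labels fall through to medium automatically); no numeric ranks, no dict, no lookup or scan.
import Mathlib
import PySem

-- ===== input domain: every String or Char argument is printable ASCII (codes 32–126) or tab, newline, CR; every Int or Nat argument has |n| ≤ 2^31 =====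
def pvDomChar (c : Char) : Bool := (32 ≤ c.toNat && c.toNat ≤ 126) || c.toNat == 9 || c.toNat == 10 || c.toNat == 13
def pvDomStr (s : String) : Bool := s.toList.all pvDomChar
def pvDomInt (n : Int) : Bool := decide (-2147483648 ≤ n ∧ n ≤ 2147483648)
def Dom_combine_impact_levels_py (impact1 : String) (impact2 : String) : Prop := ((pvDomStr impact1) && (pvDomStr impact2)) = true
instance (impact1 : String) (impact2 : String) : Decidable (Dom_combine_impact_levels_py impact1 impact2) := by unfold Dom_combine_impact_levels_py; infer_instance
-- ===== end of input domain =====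

-- B replaces the rank-encode/max/reverse-lookup with direct rules ('high' dominates,
-- 'low' only if both low, else 'medium') — simpler, no ranks, no dict, no scan.

-- ===== PORT A =====
def combine_impact_levels_py (impact1 : String) (impact2 : String) : String :=
  let impact_order : PySem.Dict String Int := PySem.Dict.mk [("low", 1), ("medium", 2), ("high", 3)]
  let level1 := PySem.Dict.getD impact_order impact1 2
  let level2 := PySem.Dict.getD impact_order impact2 2
  let combined_level := max level1 level2
  -- for-loop with early return over the dict items = first item whose value equals combined_level
  match (PySem.Dict.items impact_order).find? (fun p => p.2 == combined_level) with
  | some p => p.1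
  | none => "medium"

-- ===== PORT B =====
def combine_impact_levels_py_alt (impact1 : String) (impact2 : String) : String :=
  -- '"high" in (impact1, impact2)' = equality with either component
  if impact1 == "high" || impact2 == "high" then "high"
  else if impact1 == "low" && impact2 == "low" then "low"
  else "medium"

-- ===== PRECONDITION & SPEC =====
def Spec_combine_impact_levels_py (impact1 : String) (impact2 : String) (out : String) : Prop := out = combine_impact_levels_py_alt impact1 impact2
instance (impact1 : String) (impact2 : String) (out : String) : Decidable (Spec_combine_impact_levels_py impact1 impact2 out) := by unfold Spec_combine_impact_levels_py; infer_instance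

-- ===== CLAIM =====
def Claim_equal_combine_impact_levels_py : Prop := ∀ (impact1 : String) (impact2 : String), Dom_combine_impact_levels_py impact1 impact2 → Spec_combine_impact_levels_py impact1 impact2 (combine_impact_levels_py impact1 impact2)

-- ===== LEMMAS AND PROOFS =====

-- ===== VERDICT =====
theorem combine_impact_levels_py_spec : Claim_equal_combine_impact_levels_py := by
  intro i1 i2 _
  unfold Spec_combine_impact_levels_py
  by_cases h1a : i1 = "low" <;> by_cases h1b : i1 = "medium" <;> by_cases h1c : i1 = "high" <;>
    by_cases h2a : i2 = "low" <;> by_cases h2b : i2 = "medium" <;> by_cases h2c : i2 = "high" <;>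
      simp_all [combine_impact_levels_py, combine_impact_levels_py_alt,
        PySem.Dict.getD, PySem.Dict.get?, PySem.Dict.items, List.find?,
        Bool.beq_eq_decide_eq, eq_comm]
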